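-- pv_equiv track=rewrite | github.com/navasikya06/python-projects | cipher.py | trigram_score
-- ===== SOURCE A (Python) =====
-- def count_trigrams(s):
--     dic = {}
--     for i in range(len(s)-2): #to not get out of index range
--         a = s[i]+s[i+1]+s[i+2] #create a string of three
--         if a not in dic:
--             dic[a] = 1 #add this string of three to a dictionary and the count 1
--         else:
--             dic[a] += 1 #increment 1 if the string is already there
--     return dic
--
-- def trigram_score(s, english_trigrams):
--     s = count_trigrams(s) #make a list of trigrams for the string
--     score = 0
--     for i in s: #for each trigram in the string, see if it's in the english_trigrams, and add the corresponding log frequency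
--         if i not in english_trigrams:
--             score -= 15
--         else:
--             score += english_trigrams[i]
--     return score
-- ===== SOURCE B (Python) =====
-- def trigram_score(s, english_trigrams):
--     score = 0
--     seen = set()
--     for i in range(len(s) - 2):
--         t = s[i] + s[i+1] + s[i+2]
--         if t not in seen:
--             seen.add(t)
--             if t in english_trigrams:
--                 score += english_trigrams[t]
--             else:
--                 score -= 15
--     return score
-- ===== Notes on version B (the rewrite author's own statement) =====
-- stated objective: simpler
-- what changed: Drops the count_trigrams helper and its count dictionary entirely: B scores in one streaming pass over the indices with a seen-set, instead of A's two passes (build a trigram->count dict, then fold over its keys).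
import Mathlib
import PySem

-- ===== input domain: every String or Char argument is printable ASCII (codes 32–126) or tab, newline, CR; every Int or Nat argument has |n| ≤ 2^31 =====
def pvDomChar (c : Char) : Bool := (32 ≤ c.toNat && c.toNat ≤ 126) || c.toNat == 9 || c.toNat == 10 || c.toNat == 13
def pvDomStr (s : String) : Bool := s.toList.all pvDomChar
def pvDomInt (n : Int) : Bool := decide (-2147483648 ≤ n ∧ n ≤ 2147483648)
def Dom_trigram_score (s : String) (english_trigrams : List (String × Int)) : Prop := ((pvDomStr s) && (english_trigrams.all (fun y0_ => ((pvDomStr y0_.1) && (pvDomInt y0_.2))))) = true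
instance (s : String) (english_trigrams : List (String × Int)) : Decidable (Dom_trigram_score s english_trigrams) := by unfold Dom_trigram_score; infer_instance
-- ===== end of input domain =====

-- B is a single streaming pass with a seen-set, replacing A's two passes (count dict then key fold); objective: simpler.

-- s[i]+s[i+1]+s[i+2]; both Pythons form the trigram this way. The loop only calls it with
-- i+2 < cs.length, so the pyGetD default is never used (indices are in range, nonnegative).
def pvTri (cs : List Char) (i : Nat) : String :=
  String.ofList [PySem.List.pyGetD cs (i : Int) ' ',
    PySem.List.pyGetD cs ((i : Int) + 1) ' ',
    PySem.List.pyGetD cs ((i : Int) + 2) ' ']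

-- ===== PORT A =====
-- count_trigrams: build the trigram → count dict (Python's range(len(s)-2) is empty for len < 2, as is Nat subtraction)
def count_trigrams (s : String) : PySem.Dict String Int :=
  (List.range (s.toList.length - 2)).foldl
    (fun dic i =>
      let a := pvTri s.toList i
      if dic.contains a = false then dic.insert a 1
      else dic.insert a (dic.getD a 0 + 1))
    PySem.Dict.empty

def trigram_score (s : String) (english_trigrams : List (String × Int)) : Int :=
  (count_trigrams s).keys.foldl
    (fun score i =>
      if (PySem.Dict.mk english_trigrams).contains i = false then score - 15
      else score + (PySem.Dict.mk english_trigrams).getD i 0)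
    0

-- ===== PORT B =====
-- loop body of B: skip seen trigrams, otherwise record and score
def pvStepB (english_trigrams : List (String × Int)) (st : Int × PySem.Set String) (t : String) :
    Int × PySem.Set String :=
  if PySem.Set.contains st.2 t = false then
    let seen := PySem.Set.add st.2 t
    if (PySem.Dict.mk english_trigrams).contains t = true then
      (st.1 + (PySem.Dict.mk english_trigrams).getD t 0, seen)
    else (st.1 - 15, seen)
  else st

def trigram_score_alt (s : String) (english_trigrams : List (String × Int)) : Int :=
  ((List.range (s.toList.length - 2)).foldl
    (fun st i => pvStepB english_trigrams st (pvTri s.toList i))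
    (0, PySem.Set.empty)).1

-- ===== PRECONDITION & SPEC =====
def Spec_trigram_score (s : String) (english_trigrams : List (String × Int)) (out : Int) : Prop := out = trigram_score_alt s english_trigrams
instance (s : String) (english_trigrams : List (String × Int)) (out : Int) : Decidable (Spec_trigram_score s english_trigrams out) := by unfold Spec_trigram_score; infer_instance

-- ===== CLAIM (what is proved, stated in full; the proofs are below) =====
def Claim_equal_trigram_score : Prop := ∀ (s : String) (english_trigrams : List (String × Int)), Dom_trigram_score s english_trigrams → Spec_trigram_score s english_trigrams (trigram_score s english_trigrams)

-- ===== LEMMAS AND PROOFS =====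

-- the score contribution of one distinct trigram
def pvW (english_trigrams : List (String × Int)) (t : String) : Int :=
  if (PySem.Dict.mk english_trigrams).contains t = false then -15
  else (PySem.Dict.mk english_trigrams).getD t 0

lemma pvA_fold (et : List (String × Int)) (ks : List String) (a : Int) :
    ks.foldl (fun score i =>
      if (PySem.Dict.mk et).contains i = false then score - 15
      else score + (PySem.Dict.mk et).getD i 0) a
    = a + (ks.map (pvW et)).sum := by
  induction ks generalizing a with
  | nil => simp
  | cons t ts ih =>
    simp only [List.foldl_cons, List.map_cons, List.sum_cons, ih, pvW]
    split <;> ring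

lemma pvStepB_mem (et : List (String × Int)) (sc : Int) (seen : PySem.Set String)
    (t : String) (h : t ∈ seen) : pvStepB et (sc, seen) t = (sc, seen) := by
  have hc : PySem.Set.contains seen t = true := (PySem.Set.contains_iff seen t).mpr h
  simp only [pvStepB, hc]
  simp

lemma pvStepB_not_mem (et : List (String × Int)) (sc : Int) (seen : PySem.Set String)
    (t : String) (h : t ∉ seen) : pvStepB et (sc, seen) t = (sc + pvW et t, seen ++ [t]) := by
  have hc : PySem.Set.contains seen t = false := by
    rw [Bool.eq_false_iff]
    intro hb
    exact h ((PySem.Set.contains_iff seen t).mp hb)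
  simp only [pvStepB, hc, PySem.Set.add_of_not_mem h, pvW]
  by_cases hC : (PySem.Dict.mk et).contains t = true
  · simp [hC]
  · simp [hC, Int.sub_eq_add_neg]

-- main invariant of B's single pass: the score gained over ts equals the w-sum of the new trigrams
lemma pvB_inv (et : List (String × Int)) (ts : List String) :
    ∀ (seen : PySem.Set String) (sc : Int),
    (ts.foldl (pvStepB et) (sc, seen)).1 + (seen.map (pvW et)).sum
      = sc + ((PySem.Set.update seen ts).map (pvW et)).sum := by
  induction ts with
  | nil => intro seen sc; simp [PySem.Set.update]
  | cons t ts ih =>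
    intro seen sc
    rw [PySem.Set.update_cons]
    by_cases h : t ∈ seen
    · rw [List.foldl_cons, pvStepB_mem et sc seen t h, PySem.Set.add_of_mem h]
      exact ih seen sc
    · rw [List.foldl_cons, pvStepB_not_mem et sc seen t h, PySem.Set.add_of_not_mem h]
      have := ih (seen ++ [t]) (sc + pvW et t)
      simp only [List.map_append, List.sum_append, List.map_cons, List.map_nil,
        List.sum_cons, List.sum_nil] at this ⊢
      omega

-- A's dict keys are exactly the distinct trigrams in first-occurrence order
lemma pvKeys_count (s : String) :
    (count_trigrams s).keys
      = PySem.Set.ofList ((List.range (s.toList.length - 2)).map (pvTri s.toList)) := by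
  unfold count_trigrams
  have hpush : ∀ (d : PySem.Dict String Int) (i : Nat),
      (let a := pvTri s.toList i;
       if d.contains a = false then d.insert a 1 else d.insert a (d.getD a 0 + 1))
      = d.insert (pvTri s.toList i)
          (if d.contains (pvTri s.toList i) = false then 1 else d.getD (pvTri s.toList i) 0 + 1) := by
    intro d i; simp only []; split <;> rfl
  simp only [hpush]
  rw [PySem.Dict.keys_foldl_insert_key]
  simp [PySem.Set.update_nil_left]

-- ===== VERDICT (by name: the statement is the Claim_ definition above) =====
theorem trigram_score_spec : Claim_equal_trigram_score := by
  intro s et _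
  show trigram_score s et = trigram_score_alt s et
  rw [trigram_score, pvA_fold, pvKeys_count]
  rw [trigram_score_alt]
  have h := pvB_inv et ((List.range (s.toList.length - 2)).map (pvTri s.toList))
      PySem.Set.empty 0
  rw [List.foldl_map] at h
  simp only [PySem.Set.empty, List.map_nil, List.sum_nil] at h ⊢
  rw [PySem.Set.update_nil_left] at h
  omega
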